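-- pv_equiv track=rewrite | github.com/versa-dev/IKM-python-exam | third.py | target
-- ===== SOURCE A (Python) =====
-- def target(l, w, r, c, free_pos):
--   target = []
--   r1 = r
--   while(r1>0):
--     r1 = r1 - 1
--     target.append([r1,c])
--     if [r1,c] not in free_pos:
--       break
--   r2 = r
--   while(r2<(w-1)):
--     r2 = r2 + 1
--     target.append([r2,c])
--     if [r2,c] not in free_pos:
--       break
--   c1 = c
--   while(c1>0):
--     c1 = c1 - 1
--     target.append([r,c1])
--     if [r,c1] not in free_pos:
--       break
--   c2 = c
--   while(c2<(l-1)):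
--     c2 = c2 + 1
--     target.append([r,c2])
--     if [r,c2] not in free_pos:
--       break
--   return target
-- ===== SOURCE B (Python) =====
-- def target(l, w, r, c, free_pos):
--     out = []
--     for rng, cell in ((range(r - 1, -1, -1), lambda x: [x, c]),
--                       (range(r + 1, w), lambda x: [x, c]),
--                       (range(c - 1, -1, -1), lambda y: [r, y]),
--                       (range(c + 1, l), lambda y: [r, y])):
--         # the first blocked cell, if any, lies among the first len(free_pos)+1 ray cells
--         n = min(len(rng), len(free_pos) + 1)
--         cut = next((i for i in range(n) if cell(rng[i]) not in free_pos), None)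
--         out += [cell(x) for x in (rng if cut is None else rng[:cut + 1])]
--     return out
-- ===== Notes on version B (the rewrite author's own statement) =====
-- stated objective: alternative
-- what changed: Instead of four step-and-break walks, B treats each direction as a range-indexed ray, locates the first blocked index by scanning only the first min(ray length, len(free_pos)+1) cells (the first blocked cell must lie there), and emits the ray prefix through that index by slicing.
import Mathlib
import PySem

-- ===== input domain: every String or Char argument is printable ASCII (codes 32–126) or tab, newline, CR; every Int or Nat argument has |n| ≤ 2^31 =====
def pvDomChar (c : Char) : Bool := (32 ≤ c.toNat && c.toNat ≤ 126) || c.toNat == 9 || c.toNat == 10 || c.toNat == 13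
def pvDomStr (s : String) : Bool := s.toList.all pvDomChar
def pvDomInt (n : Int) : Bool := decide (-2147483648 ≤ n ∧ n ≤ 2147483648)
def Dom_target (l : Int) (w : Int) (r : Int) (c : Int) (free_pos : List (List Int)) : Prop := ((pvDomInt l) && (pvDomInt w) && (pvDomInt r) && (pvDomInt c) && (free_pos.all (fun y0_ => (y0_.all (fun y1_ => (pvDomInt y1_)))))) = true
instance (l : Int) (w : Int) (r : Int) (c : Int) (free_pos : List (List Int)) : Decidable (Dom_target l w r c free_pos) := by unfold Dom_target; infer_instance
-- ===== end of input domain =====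

-- B replaces A's step-and-break walks: for each of the four direction rays it finds the
-- first blocked index by scanning only the first min(ray length, len(free_pos)+1) cells
-- (the first blocked cell must lie there), then emits the ray prefix up to that index
-- (objective: alternative; bounded scan instead of a walk with break).


-- ===== PORT A =====
-- A's first while loop: while r1 > 0: r1 -= 1; append [r1,c]; break if not free.
def loopUpA (c : Int) (free_pos : List (List Int)) (r1 : Int) : List (List Int) :=
  if h : r1 > 0 then
    [r1 - 1, c] :: (if free_pos.contains [r1 - 1, c] then loopUpA c free_pos (r1 - 1) else [])
  else []
termination_by r1.toNat
decreasing_by omega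

-- A's second while loop: while r2 < w - 1: r2 += 1; append [r2,c]; break if not free.
def loopDownA (w : Int) (c : Int) (free_pos : List (List Int)) (r2 : Int) : List (List Int) :=
  if h : r2 < w - 1 then
    [r2 + 1, c] :: (if free_pos.contains [r2 + 1, c] then loopDownA w c free_pos (r2 + 1) else [])
  else []
termination_by (w - 1 - r2).toNat
decreasing_by omega

-- A's third while loop: while c1 > 0: c1 -= 1; append [r,c1]; break if not free.
def loopLeftA (r : Int) (free_pos : List (List Int)) (c1 : Int) : List (List Int) :=
  if h : c1 > 0 then
    [r, c1 - 1] :: (if free_pos.contains [r, c1 - 1] then loopLeftA r free_pos (c1 - 1) else [])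
  else []
termination_by c1.toNat
decreasing_by omega

-- A's fourth while loop: while c2 < l - 1: c2 += 1; append [r,c2]; break if not free.
def loopRightA (l : Int) (r : Int) (free_pos : List (List Int)) (c2 : Int) : List (List Int) :=
  if h : c2 < l - 1 then
    [r, c2 + 1] :: (if free_pos.contains [r, c2 + 1] then loopRightA l r free_pos (c2 + 1) else [])
  else []
termination_by (l - 1 - c2).toNat
decreasing_by omega

def target (l : Int) (w : Int) (r : Int) (c : Int) (free_pos : List (List Int)) : List (List Int) :=
  loopUpA c free_pos r ++ loopDownA w c free_pos r
    ++ loopLeftA r free_pos c ++ loopRightA l r free_pos c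

-- ===== PORT B =====
-- One direction of B: the ray has cells cell(start + step*i) for i < rlen (rlen = len(rng));
-- 'cut = next((i for i in range(n) if cell(rng[i]) not in free_pos), None)' with
-- n = min(len(rng), len(free_pos)+1), then the ray prefix through cut (whole ray if None).
def dirB (free_pos : List (List Int)) (cell : Int → List Int) (start : Int) (step : Int)
    (rlen : Nat) : List (List Int) :=
  let n : Nat := min rlen (free_pos.length + 1)
  match (List.range n).find? (fun i : Nat => !(free_pos.contains (cell (start + step * (i : Int))))) with
  | none => (List.range rlen).map (fun i : Nat => cell (start + step * (i : Int)))
  | some i => (List.range (i + 1)).map (fun j : Nat => cell (start + step * (j : Int)))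

-- B's loop over the four direction rays; len(range(r-1,-1,-1)) = r.toNat etc.
def target_alt (l : Int) (w : Int) (r : Int) (c : Int) (free_pos : List (List Int)) : List (List Int) :=
  [ ((fun x => [x, c]), r - 1, (-1 : Int), r.toNat),
    ((fun x => [x, c]), r + 1, (1 : Int), (w - 1 - r).toNat),
    ((fun y => [r, y]), c - 1, (-1 : Int), c.toNat),
    ((fun y => [r, y]), c + 1, (1 : Int), (l - 1 - c).toNat) ].foldl
    (fun out d => out ++ dirB free_pos d.1 d.2.1 d.2.2.1 d.2.2.2) []

-- ===== PRECONDITION & SPEC =====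
def Spec_target (l : Int) (w : Int) (r : Int) (c : Int) (free_pos : List (List Int)) (out : List (List Int)) : Prop := out = target_alt l w r c free_pos
instance (l : Int) (w : Int) (r : Int) (c : Int) (free_pos : List (List Int)) (out : List (List Int)) : Decidable (Spec_target l w r c free_pos out) := by unfold Spec_target; infer_instance

-- ===== CLAIM =====
def Claim_equal_target : Prop := ∀ (l : Int) (w : Int) (r : Int) (c : Int) (free_pos : List (List Int)), Dom_target l w r c free_pos → Spec_target l w r c free_pos (target l w r c free_pos)

-- ===== LEMMAS AND PROOFS =====

-- proof-only helper: the prefix of a cell list through its first blocked cell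
def cutP (free : List (List Int)) : List (List Int) → List (List Int)
  | [] => []
  | a :: t => if free.contains a then a :: cutP free t else [a]

lemma cutP_nil (free : List (List Int)) : cutP free [] = [] := rfl

lemma cutP_cons (free : List (List Int)) (a : List Int) (t : List (List Int)) :
    cutP free (a :: t) = if free.contains a then a :: cutP free t else [a] := rfl

lemma cutP_of_first (free : List (List Int)) (L : List (List Int)) (i : Nat)
    (hi : i < L.length) (hblock : free.contains (L[i]) = false)
    (hfree : ∀ j (hj : j < i), free.contains (L[j]'(by omega)) = true) :
    cutP free L = L.take (i + 1) := by
  induction L generalizing i with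
  | nil => simp at hi
  | cons a t ih =>
    cases i with
    | zero =>
      simp only [List.getElem_cons_zero] at hblock
      rw [cutP_cons, if_neg (by simpa using hblock), List.take_succ_cons, List.take_zero]
    | succ k =>
      have ha : free.contains a = true := by
        have := hfree 0 (by omega)
        simpa using this
      rw [cutP_cons, if_pos ha, List.take_succ_cons]
      congr 1
      exact ih k (by simpa using hi) (by simpa using hblock)
        (fun j hj => by have := hfree (j + 1) (by omega); simpa using this)

lemma cutP_of_allfree (free : List (List Int)) (L : List (List Int))
    (h : ∀ x ∈ L, free.contains x = true) : cutP free L = L := by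
  induction L with
  | nil => rfl
  | cons a t ih =>
    rw [cutP_cons, if_pos (h a (List.mem_cons_self ..)), ih (fun x hx => h x (List.mem_cons_of_mem _ hx))]

-- find? over List.range: minimality of the found index
lemma find?_range_min {P : Nat → Bool} {n i : Nat}
    (h : (List.range n).find? P = some i) : ∀ j < i, P j = false := by
  induction n with
  | zero => simp at h
  | succ n ih =>
    rw [List.range_succ, List.find?_append] at h
    cases hr : (List.range n).find? P with
    | some k =>
      rw [hr] at h
      simp at h
      subst h
      exact ih hr
    | none =>
      rw [hr] at h
      simp at h
      have hall := List.find?_eq_none.mp hr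
      intro j hj
      have hi : i = n := by
        rcases h with ⟨h1, h2⟩
        omega
      subst hi
      simpa using hall j (List.mem_range.mpr hj)

-- pigeonhole: n = |free|+1 pairwise-distinct cells cannot all be members of free
lemma pigeon (free : List (List Int)) (g : Nat → List Int) (n : Nat)
    (hn : n = free.length + 1)
    (hinj : ∀ i j : Nat, i < n → j < n → g i = g j → i = j)
    (hfree : ∀ i < n, free.contains (g i) = true) : False := by
  have hnodup : ((List.range n).map g).Nodup := by
    refine List.Nodup.map_on ?_ (List.nodup_range)
    intro i hi j hj hij
    exact hinj i j (List.mem_range.mp hi) (List.mem_range.mp hj) hij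
  have hsub : (List.range n).map g ⊆ free := by
    intro x hx
    rcases List.mem_map.mp hx with ⟨i, hi, rfl⟩
    have := hfree i (List.mem_range.mp hi)
    simpa using this
  have hle := (List.subperm_of_subset hnodup hsub).length_le
  simp [hn] at hle

-- B's one-direction computation equals the conceptual cut of the full ray
lemma dirB_eq_cutP (free : List (List Int)) (cell : Int → List Int) (start step : Int)
    (rlen : Nat)
    (hinj : ∀ i j : Nat, i < rlen → j < rlen →
      cell (start + step * (i : Int)) = cell (start + step * (j : Int)) → i = j) :
    dirB free cell start step rlen
      = cutP free ((List.range rlen).map (fun i : Nat => cell (start + step * (i : Int)))) := by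
  unfold dirB
  cases h : (List.range (min rlen (free.length + 1))).find?
      (fun i : Nat => !(free.contains (cell (start + step * (i : Int))))) with
  | some i =>
    have hiln : i < min rlen (free.length + 1) :=
      List.mem_range.mp (List.mem_of_find?_eq_some h)
    have hilt : i < rlen := by omega
    have hPi : free.contains (cell (start + step * (i : Int))) = false := by
      have := List.find?_some h
      simpa using this
    have hmin : ∀ j : Nat, j < i → free.contains (cell (start + step * (j : Int))) = true := by
      intro j hj
      have := find?_range_min h j hj
      simpa using this
    simp only [h]
    rw [cutP_of_first free _ i (by simpa using hilt)
      (by simpa using hPi)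
      (fun j hj => by
        have := hmin j hj
        simpa using this)]
    rw [← List.map_take, List.take_range]
    have hm : min (i + 1) rlen = i + 1 := by omega
    rw [hm]
  | none =>
    have hall : ∀ i : Nat, i < min rlen (free.length + 1) →
        free.contains (cell (start + step * (i : Int))) = true := by
      intro i hi
      have := List.find?_eq_none.mp h i (List.mem_range.mpr hi)
      simpa using this
    simp only [h]
    by_cases hc : rlen ≤ free.length + 1
    · rw [cutP_of_allfree free _ (by
        intro x hx
        rcases List.mem_map.mp hx with ⟨i, hi, rfl⟩
        exact hall i (by have := List.mem_range.mp hi; omega))]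
    · exfalso
      exact pigeon free (fun i : Nat => cell (start + step * (i : Int))) (free.length + 1) rfl
        (fun i j hi hj => hinj i j (by omega) (by omega))
        (fun i hi => hall i (by omega))

-- A-side: each walk equals the cut of its full ray (stated in dirB's ray form)
lemma up_eq (c : Int) (free_pos : List (List Int)) (x : Int) :
    loopUpA c free_pos x
      = cutP free_pos ((List.range x.toNat).map (fun i : Nat => [x - 1 + (-1) * (i : Int), c])) := by
  fun_induction loopUpA c free_pos x with
  | case1 x h ih =>
    have hx : x.toNat = (x - 1).toNat + 1 := by omega
    rw [hx, List.range_succ_eq_map, List.map_cons, List.map_map, cutP_cons]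
    have hhead : [x - 1 + (-1) * ((0 : Nat) : Int), c] = [x - 1, c] := by norm_num
    rw [hhead]
    have htail : (List.range (x - 1).toNat).map
          ((fun i : Nat => [x - 1 + (-1) * (i : Int), c]) ∘ Nat.succ)
        = (List.range (x - 1).toNat).map (fun i : Nat => [x - 1 - 1 + (-1) * (i : Int), c]) := by
      refine List.map_congr_left (fun i _ => ?_)
      simp only [Function.comp]
      push_cast
      norm_num
      ring
    rw [htail, ← ih]
    split_ifs <;> rfl
  | case2 x h =>
    have hx : x.toNat = 0 := by omega
    rw [hx, List.range_zero, List.map_nil, cutP_nil]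

lemma down_eq (w c : Int) (free_pos : List (List Int)) (x : Int) :
    loopDownA w c free_pos x
      = cutP free_pos ((List.range (w - 1 - x).toNat).map (fun i : Nat => [x + 1 + 1 * (i : Int), c])) := by
  fun_induction loopDownA w c free_pos x with
  | case1 x h ih =>
    have hx : (w - 1 - x).toNat = (w - 1 - (x + 1)).toNat + 1 := by omega
    rw [hx, List.range_succ_eq_map, List.map_cons, List.map_map, cutP_cons]
    have hhead : [x + 1 + 1 * ((0 : Nat) : Int), c] = [x + 1, c] := by norm_num
    rw [hhead]
    have htail : (List.range (w - 1 - (x + 1)).toNat).map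
          ((fun i : Nat => [x + 1 + 1 * (i : Int), c]) ∘ Nat.succ)
        = (List.range (w - 1 - (x + 1)).toNat).map (fun i : Nat => [x + 1 + 1 + 1 * (i : Int), c]) := by
      refine List.map_congr_left (fun i _ => ?_)
      simp only [Function.comp]
      push_cast
      norm_num
      ring
    rw [htail, ← ih]
    split_ifs <;> rfl
  | case2 x h =>
    have hx : (w - 1 - x).toNat = 0 := by omega
    rw [hx, List.range_zero, List.map_nil, cutP_nil]

lemma left_eq (r : Int) (free_pos : List (List Int)) (x : Int) :
    loopLeftA r free_pos x
      = cutP free_pos ((List.range x.toNat).map (fun i : Nat => [r, x - 1 + (-1) * (i : Int)])) := by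
  fun_induction loopLeftA r free_pos x with
  | case1 x h ih =>
    have hx : x.toNat = (x - 1).toNat + 1 := by omega
    rw [hx, List.range_succ_eq_map, List.map_cons, List.map_map, cutP_cons]
    have hhead : [r, x - 1 + (-1) * ((0 : Nat) : Int)] = [r, x - 1] := by norm_num
    rw [hhead]
    have htail : (List.range (x - 1).toNat).map
          ((fun i : Nat => [r, x - 1 + (-1) * (i : Int)]) ∘ Nat.succ)
        = (List.range (x - 1).toNat).map (fun i : Nat => [r, x - 1 - 1 + (-1) * (i : Int)]) := by
      refine List.map_congr_left (fun i _ => ?_)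
      simp only [Function.comp]
      push_cast
      norm_num
      ring
    rw [htail, ← ih]
    split_ifs <;> rfl
  | case2 x h =>
    have hx : x.toNat = 0 := by omega
    rw [hx, List.range_zero, List.map_nil, cutP_nil]

lemma right_eq (l r : Int) (free_pos : List (List Int)) (x : Int) :
    loopRightA l r free_pos x
      = cutP free_pos ((List.range (l - 1 - x).toNat).map (fun i : Nat => [r, x + 1 + 1 * (i : Int)])) := by
  fun_induction loopRightA l r free_pos x with
  | case1 x h ih =>
    have hx : (l - 1 - x).toNat = (l - 1 - (x + 1)).toNat + 1 := by omega
    rw [hx, List.range_succ_eq_map, List.map_cons, List.map_map, cutP_cons]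
    have hhead : [r, x + 1 + 1 * ((0 : Nat) : Int)] = [r, x + 1] := by norm_num
    rw [hhead]
    have htail : (List.range (l - 1 - (x + 1)).toNat).map
          ((fun i : Nat => [r, x + 1 + 1 * (i : Int)]) ∘ Nat.succ)
        = (List.range (l - 1 - (x + 1)).toNat).map (fun i : Nat => [r, x + 1 + 1 + 1 * (i : Int)]) := by
      refine List.map_congr_left (fun i _ => ?_)
      simp only [Function.comp]
      push_cast
      norm_num
      ring
    rw [htail, ← ih]
    split_ifs <;> rfl
  | case2 x h =>
    have hx : (l - 1 - x).toNat = 0 := by omega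
    rw [hx, List.range_zero, List.map_nil, cutP_nil]

-- ===== VERDICT =====
theorem target_spec : Claim_equal_target := by
  intro l w r c free_pos _
  unfold Spec_target target target_alt
  simp only [List.foldl, List.nil_append, List.append_assoc]
  rw [dirB_eq_cutP free_pos (fun x => [x, c]) (r - 1) (-1) r.toNat
      (fun i j _ _ hij => by simp at hij; omega),
    dirB_eq_cutP free_pos (fun x => [x, c]) (r + 1) 1 (w - 1 - r).toNat
      (fun i j _ _ hij => by simp at hij; omega),
    dirB_eq_cutP free_pos (fun y => [r, y]) (c - 1) (-1) c.toNat
      (fun i j _ _ hij => by simp at hij; omega),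
    dirB_eq_cutP free_pos (fun y => [r, y]) (c + 1) 1 (l - 1 - c).toNat
      (fun i j _ _ hij => by simp at hij; omega)]
  rw [up_eq, down_eq, left_eq, right_eq]
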